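-- pv_equiv track=rewrite | github.com/loma-baldsson/french_conjugator_bot | rewrite.py | create_template_table
-- ===== SOURCE A (Python) =====
-- EDGE_MARKER = "!"
--
-- CORNER_MARKER = "."
--
-- def create_template_table(table):
--     new_table = []
--
--     for i in range(2*len(table) + 1):
--         new_row = []
--         for j in range(2*len(table[0]) + 1):
--             new_row.append(EDGE_MARKER)
--
--         new_table.append(new_row)
--
--     for i in range(0, len(new_table), 2):
--         for j in range(0, len(new_table[0]), 2):
--             new_table[i][j] = CORNER_MARKER
--
--     for i in range(len(table)):
--         for j in range(len(table[0])):
--             new_table[i*2 + 1][j*2 + 1] = table[i][j]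
--
--     return new_table
-- ===== SOURCE B (Python) =====
-- EDGE_MARKER = "!"
--
-- CORNER_MARKER = "."
--
-- def create_template_table(table):
--     n = len(table)
--     m = len(table[0])
--     return [[CORNER_MARKER if i % 2 == 0 and j % 2 == 0
--              else table[i // 2][j // 2] if i % 2 == 1 and j % 2 == 1
--              else EDGE_MARKER
--              for j in range(2 * m + 1)]
--             for i in range(2 * n + 1)]
-- ===== Notes on version B (the rewrite author's own statement) =====
-- stated objective: simpler
-- what changed: Replaces A's three passes (fill an all-edge grid, overwrite even/even cells with corners, overwrite odd/odd cells with table entries) by a single nested comprehension that classifies each cell (i,j) by index parity.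
import Mathlib
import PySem

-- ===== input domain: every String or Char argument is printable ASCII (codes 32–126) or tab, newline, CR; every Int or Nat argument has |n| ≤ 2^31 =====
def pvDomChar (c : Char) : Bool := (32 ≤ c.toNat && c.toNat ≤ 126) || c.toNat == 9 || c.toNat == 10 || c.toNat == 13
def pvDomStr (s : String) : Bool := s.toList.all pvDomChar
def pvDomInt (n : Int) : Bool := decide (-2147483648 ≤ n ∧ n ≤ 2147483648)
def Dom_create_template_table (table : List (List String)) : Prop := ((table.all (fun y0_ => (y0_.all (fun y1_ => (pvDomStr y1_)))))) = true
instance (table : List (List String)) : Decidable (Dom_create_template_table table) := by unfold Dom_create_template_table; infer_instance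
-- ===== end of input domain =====

-- B fuses A's three fill/overwrite passes into one parity-classified comprehension (objective: simpler; same return value).

-- ===== PORT A =====
def EDGE_MARKER : String := "!"

def CORNER_MARKER : String := "."

-- helper: Python's 2-level assignment  g[i][j] = v
def pvGridSet (g : List (List String)) (i j : Int) (v : String) : List (List String) :=
  PySem.List.pySetD g i (PySem.List.pySetD (PySem.List.pyGetD g i []) j v)

def create_template_table (table : List (List String)) : List (List String) :=
  -- pass 1: fill a (2*len(table)+1) × (2*len(table[0])+1) grid with EDGE_MARKER
  let new_table1 : List (List String) :=
    (PySem.List.pyRange 0 (2 * PySem.List.len table + 1) 1).map (fun _i =>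
      (PySem.List.pyRange 0 (2 * PySem.List.len (PySem.List.pyGetD table 0 []) + 1) 1).map
        (fun _j => EDGE_MARKER))
  -- pass 2: overwrite every even/even cell with CORNER_MARKER
  let new_table2 : List (List String) :=
    (PySem.List.pyRange 0 (PySem.List.len new_table1) 2).foldl (fun nt i =>
      (PySem.List.pyRange 0 (PySem.List.len (PySem.List.pyGetD nt 0 [])) 2).foldl
        (fun nt' j => pvGridSet nt' i j CORNER_MARKER) nt) new_table1
  -- pass 3: write table[i][j] into cell (2*i+1, 2*j+1)
  (PySem.List.pyRange 0 (PySem.List.len table) 1).foldl (fun nt i =>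
    (PySem.List.pyRange 0 (PySem.List.len (PySem.List.pyGetD table 0 [])) 1).foldl
      (fun nt' j => pvGridSet nt' (i * 2 + 1) (j * 2 + 1)
        (PySem.List.pyGetD (PySem.List.pyGetD table i []) j "")) nt) new_table2

-- ===== PORT B =====
def create_template_table_alt (table : List (List String)) : List (List String) :=
  let n := table.length
  let m := (PySem.List.pyGetD table 0 ([] : List String)).length
  (List.range (2 * n + 1)).map (fun i =>
    (List.range (2 * m + 1)).map (fun j =>
      if i % 2 = 0 ∧ j % 2 = 0 then CORNER_MARKER
      else if i % 2 = 1 ∧ j % 2 = 1 then (table.getD (i / 2) []).getD (j / 2) ""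
      else EDGE_MARKER))

-- ===== PRECONDITION & SPEC =====
-- Pre_ excludes exactly the inputs on which the Python A raises IndexError: the empty
-- table (table[0]) and ragged tables with a row shorter than row 0 (table[i][j]).
-- (Python B raises IndexError on exactly the same inputs.)
def Pre_create_template_table (table : List (List String)) : Prop :=
  table ≠ [] ∧ ∀ row ∈ table, (table.getD 0 []).length ≤ row.length

instance (table : List (List String)) : Decidable (Pre_create_template_table table) := by
  unfold Pre_create_template_table; infer_instance

def pvWitness_create_template_table : List (List String) := [["a", "b"], ["c", "d"]]

def Spec_create_template_table (table : List (List String)) (out : List (List String)) : Prop := out = create_template_table_alt table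
instance (table : List (List String)) (out : List (List String)) : Decidable (Spec_create_template_table table out) := by unfold Spec_create_template_table; infer_instance

-- ===== CLAIM (what is proved, stated in full; the proofs are below) =====
def Claim_equal_create_template_table : Prop := ∀ (table : List (List String)), Dom_create_template_table table → Pre_create_template_table table → Spec_create_template_table table (create_template_table table)

-- ===== LEMMAS AND PROOFS =====

-- proof-side row descriptions of the intermediate grids
def pvR1 (m : Nat) : List String := (List.range (2 * m + 1)).map (fun _ => EDGE_MARKER)

def pvR2 (m : Nat) : List String :=
  (List.range (2 * m + 1)).map (fun q => if q % 2 = 0 ∧ q < 2 * (m + 1) then CORNER_MARKER else EDGE_MARKER)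

def pvR3 (table : List (List String)) (m k : Nat) : List String :=
  (List.range (2 * m + 1)).map (fun q =>
    if q % 2 = 1 ∧ q < 2 * m + 1 then (table.getD k []).getD (q / 2) "" else EDGE_MARKER)

lemma pvMapRangeSet {α : Type} (L p : Nat) (f : Nat → α) (v : α) (_hp : p < L) :
    ((List.range L).map f).set p v = (List.range L).map (fun q => if q = p then v else f q) := by
  apply List.ext_getElem
  · simp
  · intro i h1 h2
    simp only [List.length_set, List.length_map, List.length_range] at h1
    simp [List.getElem_set, eq_comm]
lemma pvPyRangeTwo (L : Nat) :
    PySem.List.pyRange 0 ((2 * L + 1 : Nat) : Int) 2 = (List.range (L + 1)).map (fun t => ((2 * t : Nat) : Int)) := by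
  rw [PySem.List.pyRange_of_pos _ _ (by norm_num)]
  have h1 : (if (0 : Int) < ((2 * L + 1 : Nat) : Int) then ((((2 * L + 1 : Nat) : Int) - 0 + 2 - 1) / 2).toNat else 0) = L + 1 := by
    rw [if_pos (by push_cast; omega)]
    push_cast
    omega
  rw [h1]
  apply List.map_congr_left
  intro k _
  push_cast
  ring
lemma pvGridSetNat (g : List (List String)) (iN jN : Nat) (v : String) :
    pvGridSet g (iN : Int) (jN : Int) v = g.set iN ((g.getD iN []).set jN v) := by
  simp [pvGridSet]
lemma pvFoldGridSet {β : Type} (js : List β) (F : List String → β → List String) (i : Nat) :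
    ∀ g : List (List String), i < g.length →
      js.foldl (fun nt j => nt.set i (F (nt.getD i []) j)) g = g.set i (js.foldl F (g.getD i [])) := by
  induction js with
  | nil =>
    intro g hi
    simp only [List.foldl_nil]
    rw [List.getD_eq_getElem _ _ hi]
    exact (List.set_getElem_self hi).symm
  | cons j js ih =>
    intro g hi
    simp only [List.foldl_cons]
    rw [ih _ (by simp [hi]), List.set_set]
    congr 2
    rw [List.getD_eq_getElem _ _ (by simp [hi] : i < (g.set i (F (g.getD i []) j)).length)]
    exact List.getElem_set_self _
lemma pvRowUpd0 (T L : Nat) (val : Nat → String) (f : Nat → String) (hT : 2 * T ≤ L + 1) :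
    (List.range T).foldl (fun r t => r.set (2 * t) (val t)) ((List.range L).map f)
      = (List.range L).map (fun q => if q % 2 = 0 ∧ q < 2 * T then val (q / 2) else f q) := by
  induction T with
  | zero =>
    simp only [List.range_zero, List.foldl_nil]
    apply List.map_congr_left
    intro q _
    rw [if_neg (by omega)]
  | succ T ih =>
    rw [List.range_succ, List.foldl_append, ih (by omega), List.foldl_cons, List.foldl_nil,
      pvMapRangeSet _ _ _ _ (by omega)]
    apply List.map_congr_left
    intro q hq
    rw [List.mem_range] at hq
    by_cases h : q = 2 * T
    · subst h
      rw [if_pos rfl, if_pos (by omega)]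
      congr 1
      omega
    · rw [if_neg h]
      by_cases h2 : q % 2 = 0 ∧ q < 2 * T
      · rw [if_pos h2, if_pos (by omega)]
      · rw [if_neg h2, if_neg (by omega)]

lemma pvPass2Char (n m : Nat) (K : Nat) (hK : K ≤ n + 1) :
    (List.range K).foldl (fun nt k =>
        (PySem.List.pyRange 0 (((nt.getD 0 ([] : List String)).length : Nat) : Int) 2).foldl
          (fun nt' j => pvGridSet nt' ((2 * k : Nat) : Int) j CORNER_MARKER) nt)
      ((List.range (2 * n + 1)).map (fun _ => pvR1 m))
    = (List.range (2 * n + 1)).map (fun p => if p % 2 = 0 ∧ p < 2 * K then pvR2 m else pvR1 m) := by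
  induction K with
  | zero =>
    simp only [List.range_zero, List.foldl_nil]
    apply List.map_congr_left
    intro p _
    rw [if_neg (by omega)]
  | succ K ih =>
    rw [List.range_succ (n := K), List.foldl_append, ih (by omega), List.foldl_cons, List.foldl_nil]
    have hlen : ((((List.range (2 * n + 1)).map
          (fun p => if p % 2 = 0 ∧ p < 2 * K then pvR2 m else pvR1 m)).getD 0 ([] : List String)).length : Int)
        = ((2 * m + 1 : Nat) : Int) := by
      rw [PySem.List.getD_map_range _ _ _ _ (by omega)]
      split_ifs <;> simp [pvR1, pvR2]
    rw [hlen, pvPyRangeTwo m, List.foldl_map]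
    simp only [pvGridSetNat]
    rw [pvFoldGridSet (List.range (m + 1)) (fun r t => r.set (2 * t) CORNER_MARKER) (2 * K) _ (by simp; omega)]
    rw [PySem.List.getD_map_range _ _ _ _ (by omega : 2 * K < 2 * n + 1)]
    rw [if_neg (by omega)]
    rw [pvR1, pvRowUpd0 (m + 1) (2 * m + 1) _ _ (by omega)]
    rw [pvMapRangeSet _ _ _ _ (by omega : 2 * K < 2 * n + 1)]
    apply List.map_congr_left
    intro p hp
    rw [List.mem_range] at hp
    by_cases h : p = 2 * K
    · subst h
      rw [if_pos rfl, if_pos (by omega)]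
      rfl
    · rw [if_neg h]
      by_cases h2 : p % 2 = 0 ∧ p < 2 * K
      · rw [if_pos h2, if_pos (by omega)]
      · rw [if_neg h2, if_neg (by omega)]

lemma pvRowUpd1 (T L : Nat) (val : Nat → String) (f : Nat → String) (hT : 2 * T + 1 ≤ L + 1) :
    (List.range T).foldl (fun r t => r.set (2 * t + 1) (val t)) ((List.range L).map f)
      = (List.range L).map (fun q => if q % 2 = 1 ∧ q < 2 * T + 1 then val (q / 2) else f q) := by
  induction T with
  | zero =>
    simp only [List.range_zero, List.foldl_nil]
    apply List.map_congr_left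
    intro q _
    rw [if_neg (by omega)]
  | succ T ih =>
    rw [List.range_succ (n := T), List.foldl_append, ih (by omega), List.foldl_cons, List.foldl_nil,
      pvMapRangeSet _ _ _ _ (by omega)]
    apply List.map_congr_left
    intro q hq
    rw [List.mem_range] at hq
    by_cases h : q = 2 * T + 1
    · subst h
      rw [if_pos rfl, if_pos (by omega)]
      congr 1
      omega
    · rw [if_neg h]
      by_cases h2 : q % 2 = 1 ∧ q < 2 * T + 1
      · rw [if_pos h2, if_pos (by omega)]
      · rw [if_neg h2, if_neg (by omega)]

lemma pvGridSetNat' (g : List (List String)) (k t : Nat) (v : String) :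
    pvGridSet g ((k : Int) * 2 + 1) ((t : Int) * 2 + 1) v
      = g.set (2 * k + 1) ((g.getD (2 * k + 1) []).set (2 * t + 1) v) := by
  have h1 : ((k : Int) * 2 + 1) = ((2 * k + 1 : Nat) : Int) := by push_cast; ring
  have h2 : ((t : Int) * 2 + 1) = ((2 * t + 1 : Nat) : Int) := by push_cast; ring
  rw [h1, h2, pvGridSetNat]

lemma pvPass3Char (table : List (List String)) (n m : Nat) (hn : n = table.length)
    (g0 : Nat → List String) (hg : ∀ k, k < n → g0 (2 * k + 1) = pvR1 m) :
    ∀ K, K ≤ n →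
    (List.range K).foldl (fun nt (k : Nat) =>
        (List.range m).foldl
          (fun nt' (t : Nat) => pvGridSet nt' ((k : Int) * 2 + 1) ((t : Int) * 2 + 1)
            (PySem.List.pyGetD (PySem.List.pyGetD table (k : Int) []) (t : Int) "")) nt)
      ((List.range (2 * n + 1)).map g0)
    = (List.range (2 * n + 1)).map (fun p => if p % 2 = 1 ∧ p < 2 * K + 1 then pvR3 table m (p / 2) else g0 p) := by
  intro K
  induction K with
  | zero =>
    intro _
    simp only [List.range_zero, List.foldl_nil]
    apply List.map_congr_left
    intro p _
    rw [if_neg (by omega)]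
  | succ K ih =>
    intro hK
    rw [List.range_succ (n := K), List.foldl_append, ih (by omega), List.foldl_cons, List.foldl_nil]
    simp only [pvGridSetNat', PySem.List.pyGetD_natCast]
    rw [pvFoldGridSet (List.range m)
        (fun r t => r.set (2 * t + 1) ((table.getD K []).getD t ""))
        (2 * K + 1) _ (by simp; omega)]
    · rw [PySem.List.getD_map_range _ _ _ _ (by omega : 2 * K + 1 < 2 * n + 1)]
      rw [if_neg (by omega), hg K (by omega), pvR1,
        pvRowUpd1 m (2 * m + 1) _ _ (by omega)]
      rw [pvMapRangeSet _ _ _ _ (by omega : 2 * K + 1 < 2 * n + 1)]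
      apply List.map_congr_left
      intro p hp
      rw [List.mem_range] at hp
      by_cases h : p = 2 * K + 1
      · subst h
        rw [if_pos rfl, if_pos (by omega)]
        have : (2 * K + 1) / 2 = K := by omega
        rw [this]
        rfl
      · rw [if_neg h]
        by_cases h2 : p % 2 = 1 ∧ p < 2 * K + 1
        · rw [if_pos h2, if_pos (by omega)]
        · rw [if_neg h2, if_neg (by omega)]


-- ===== VERDICT (by name: the statement is the Claim_ definition above) =====
theorem create_template_table_spec : Claim_equal_create_template_table := by
  intro table _ _
  unfold Spec_create_template_table
  simp only [create_template_table, create_template_table_alt, PySem.List.len_eq,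
    PySem.List.pyGetD_zero]
  rw [show (2 * ((table.length : Nat) : Int) + 1) = ((2 * table.length + 1 : Nat) : Int) by push_cast; ring]
  rw [show (2 * (((table.getD 0 []).length : Nat) : Int) + 1) = ((2 * (table.getD 0 []).length + 1 : Nat) : Int) by push_cast; ring]
  simp only [PySem.List.pyRange_zero_natCast, List.map_map, Function.comp_def,
    List.length_map, List.length_range]
  rw [show (List.map (fun _ => EDGE_MARKER) (List.range (2 * (table.getD 0 []).length + 1))) = pvR1 (table.getD 0 []).length from rfl]
  rw [pvPyRangeTwo table.length]
  simp only [List.foldl_map]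
  rw [pvPass2Char table.length (table.getD 0 []).length (table.length + 1) (le_refl _)]
  rw [pvPass3Char table table.length (table.getD 0 []).length rfl
    (fun p => if p % 2 = 0 ∧ p < 2 * (table.length + 1) then pvR2 (table.getD 0 []).length else pvR1 (table.getD 0 []).length)
    (fun k hk => by simp only []; rw [if_neg (by omega)]) table.length (le_refl _)]
  apply List.map_congr_left
  intro p hp
  rw [List.mem_range] at hp
  by_cases h : p % 2 = 1
  · rw [if_pos ⟨h, by omega⟩, pvR3]
    apply List.map_congr_left
    intro q hq
    rw [List.mem_range] at hq
    rw [if_neg (by omega : ¬(p % 2 = 0 ∧ q % 2 = 0))]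
    by_cases h2 : q % 2 = 1
    · rw [if_pos ⟨h2, by omega⟩, if_pos ⟨h, h2⟩]
    · rw [if_neg (by omega : ¬(q % 2 = 1 ∧ q < 2 * (table.getD 0 []).length + 1)),
        if_neg (by omega : ¬(p % 2 = 1 ∧ q % 2 = 1))]
  · rw [if_neg (by omega : ¬(p % 2 = 1 ∧ p < 2 * table.length + 1)),
      if_pos (⟨by omega, by omega⟩ : p % 2 = 0 ∧ p < 2 * (table.length + 1)), pvR2]
    apply List.map_congr_left
    intro q hq
    rw [List.mem_range] at hq
    by_cases h2 : q % 2 = 0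
    · rw [if_pos ⟨h2, by omega⟩, if_pos ⟨by omega, h2⟩]
    · rw [if_neg (by omega : ¬(q % 2 = 0 ∧ q < 2 * ((table.getD 0 []).length + 1))),
        if_neg (by omega : ¬(p % 2 = 0 ∧ q % 2 = 0)),
        if_neg (by omega : ¬(p % 2 = 1 ∧ q % 2 = 1))]
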